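-- pv_equiv track=rewrite | github.com/ChengqiLiu/CS120 | Project/3/2-node2.py | FindNumberCount
-- ===== SOURCE A (Python) =====
-- def FindNumberCount(array):
--     positive_num=0
--     negative_num=0
--     for i in array:
--         if i<0:
--             negative_num+=1
--         elif i>0:
--             positive_num+=1
--     if positive_num>=negative_num:
--         return "0"
--     else:
--         return "1"
-- ===== SOURCE B (Python) =====
-- def FindNumberCount(array):
--     # Median-sign method: after dropping zeros and sorting, negatives occupy a
--     # prefix; negatives outnumber positives exactly when the (upper-)middle
--     # element of the sorted nonzero list is negative.
--     m = sorted(i for i in array if i != 0)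
--     if m and m[len(m) // 2] < 0:
--         return "1"
--     return "0"
-- ===== Notes on version B (the rewrite author's own statement) =====
-- stated objective: alternative
-- what changed: Replaces A's counting pass (two counters, pos>=neg comparison) with a filter-sort-median check: drop zeros, sort, and inspect the sign of the upper-middle element, which is negative exactly when negatives outnumber positives since sorting puts all negatives in a prefix.
import Mathlib
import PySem

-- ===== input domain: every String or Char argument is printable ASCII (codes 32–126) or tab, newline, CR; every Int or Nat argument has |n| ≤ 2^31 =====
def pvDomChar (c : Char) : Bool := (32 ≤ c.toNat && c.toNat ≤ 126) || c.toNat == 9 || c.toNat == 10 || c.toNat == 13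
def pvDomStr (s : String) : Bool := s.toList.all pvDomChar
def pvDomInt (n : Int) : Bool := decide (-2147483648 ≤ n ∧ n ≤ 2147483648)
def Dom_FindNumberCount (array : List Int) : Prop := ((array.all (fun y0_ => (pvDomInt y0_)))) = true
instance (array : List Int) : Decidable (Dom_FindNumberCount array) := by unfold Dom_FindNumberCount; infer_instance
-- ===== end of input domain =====

-- B replaces A's counting pass with a filter-sort-median check: after dropping
-- zeros and sorting, negatives outnumber positives iff the upper-middle element
-- is negative (alternative algorithm; not faster).

-- ===== PORT A =====
def FindNumberCount (array : List Int) : String :=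
  let counts := array.foldl
    (fun (st : Int × Int) i =>
      if i < 0 then (st.1, st.2 + 1)
      else if i > 0 then (st.1 + 1, st.2)
      else st)
    (0, 0)
  if counts.1 ≥ counts.2 then "0" else "1"

-- ===== PORT B =====
-- m[len(m)//2] is ported as List.getD (m.length / 2) 0: the index is a
-- nonnegative in-range literal expression, so Nat division and lookup are exact
-- here (the default 0 is never used: length / 2 < length when m ≠ []).
def FindNumberCount_alt (array : List Int) : String :=
  let m := PySem.List.sorted (array.filter (fun i => decide (i ≠ 0))) (fun x => x) false
  if m ≠ [] ∧ m.getD (m.length / 2) 0 < 0 then "1" else "0"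

-- ===== PRECONDITION & SPEC =====
def Spec_FindNumberCount (array : List Int) (out : String) : Prop := out = FindNumberCount_alt array
instance (array : List Int) (out : String) : Decidable (Spec_FindNumberCount array out) := by unfold Spec_FindNumberCount; infer_instance

-- ===== CLAIM (what is proved, stated in full; the proofs are below) =====
def Claim_equal_FindNumberCount : Prop := ∀ (array : List Int), Dom_FindNumberCount array → Spec_FindNumberCount array (FindNumberCount array)

-- ===== LEMMAS AND PROOFS =====

-- A's fold computes the two sign counts.
theorem pv_counts (array : List Int) (p n : Int) :
    array.foldl
      (fun (st : Int × Int) i =>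
        if i < 0 then (st.1, st.2 + 1)
        else if i > 0 then (st.1 + 1, st.2)
        else st)
      (p, n)
    = (p + array.countP (fun i => decide (0 < i)), n + array.countP (fun i => decide (i < 0))) := by
  induction array generalizing p n with
  | nil => simp
  | cons x xs ih =>
    simp only [List.foldl_cons, List.countP_cons]
    by_cases h1 : x < 0
    · simp only [if_pos h1, ih]
      have h2 : ¬ (0 < x) := by omega
      simp [h1, h2]
      omega
    · by_cases h2 : 0 < x
      · simp only [if_neg h1, if_pos h2, ih]
        simp [h1, h2]
        omega
      · simp only [if_neg h1, if_neg h2, ih]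
        simp [h1, h2]

-- In a ≤-sorted list of Ints, the element at index k is negative iff k is
-- below the number of negative elements (negatives occupy a prefix).
theorem pv_sorted_index (m : List Int) (hs : m.Pairwise (· ≤ ·)) (k : Nat) (hk : k < m.length) :
    (m.getD k 0 < 0 ↔ k < m.countP (fun i => decide (i < 0))) := by
  induction m generalizing k with
  | nil => simp at hk
  | cons x xs ih =>
    have hx : ∀ y ∈ xs, x ≤ y := by
      intro y hy; exact (List.pairwise_cons.mp hs).1 y hy
    have hs' : xs.Pairwise (· ≤ ·) := (List.pairwise_cons.mp hs).2
    cases k with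
    | zero =>
      simp only [List.getD_cons_zero, List.countP_cons]
      by_cases h : x < 0
      · simp [h]
      · have hz : xs.countP (fun i => decide (i < 0)) = 0 := by
          rw [List.countP_eq_zero]
          intro y hy
          have := hx y hy
          simp; omega
        simp [h, hz]
    | succ k =>
      simp only [List.getD_cons_succ, List.countP_cons]
      have hk' : k < xs.length := by simpa using hk
      by_cases h : x < 0
      · rw [ih hs' k hk']
        simp [h]
      · have hz : xs.countP (fun i => decide (i < 0)) = 0 := by
          rw [List.countP_eq_zero]
          intro y hy
          have := hx y hy
          simp; omega
        have hnotneg : ¬ (xs.getD k 0 < 0) := by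
          rw [ih hs' k hk']
          omega
        exact iff_of_false hnotneg (by rw [hz]; simp [h])

-- ===== VERDICT (by name: the statement is the Claim_ definition above) =====
theorem FindNumberCount_spec : Claim_equal_FindNumberCount := by
  intro array _
  unfold Spec_FindNumberCount FindNumberCount FindNumberCount_alt
  simp only [pv_counts, zero_add]
  set f := array.filter (fun i => decide (i ≠ 0)) with hf
  set m := PySem.List.sorted f (fun x => x) false with hm
  have hperm : m.Perm f := PySem.List.sorted_perm f (fun x => x) false
  have hpair : m.Pairwise (· ≤ ·) := by
    simpa using PySem.List.sorted_pairwise f (fun x => x)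
  -- counts in m equal counts in array (filter keeps every signed element)
  have hneg : m.countP (fun i => decide (i < 0)) = array.countP (fun i => decide (i < 0)) := by
    rw [hperm.countP_eq, hf, List.countP_filter]
    congr 1
    funext i
    by_cases h : i < 0 <;> simp [h] <;> omega
  have hpos : m.countP (fun i => decide (0 < i)) = array.countP (fun i => decide (0 < i)) := by
    rw [hperm.countP_eq, hf, List.countP_filter]
    congr 1
    funext i
    by_cases h : 0 < i <;> simp [h] <;> omega
  set P := array.countP (fun i => decide (0 < i)) with hP
  set N := array.countP (fun i => decide (i < 0)) with hN
  have hlen : m.length = P + N := by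
    have hnz : ∀ y ∈ m, y ≠ 0 := by
      intro y hy
      have := List.of_mem_filter (hperm.mem_iff.mp hy)
      simpa using this
    have hsplit := List.length_eq_countP_add_countP (l := m) (p := fun i => decide (0 < i))
    have hcong : m.countP (fun a => decide (¬ decide (0 < a) = true)) = m.countP (fun i => decide (i < 0)) := by
      apply List.countP_congr
      intro y hy
      have := hnz y hy
      by_cases h : 0 < y <;> simp [h] <;> omega
    rw [hsplit, hcong, hpos, hneg]
  by_cases hnil : m = []
  · have : P + N = 0 := by rw [← hlen, hnil]; simp
    have hP0 : P = 0 := by omega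
    have hN0 : N = 0 := by omega
    simp [hnil, hP0, hN0]
  · have hklt : m.length / 2 < m.length := by
      have : 0 < m.length := List.length_pos_iff.mpr hnil
      omega
    have hidx := pv_sorted_index m hpair (m.length / 2) hklt
    rw [hN] at hneg
    rw [hneg] at hidx
    by_cases hA : (P : Int) ≥ (N : Int)
    · -- A returns "0"; show B's condition fails
      have : ¬ (m.length / 2 < N) := by
        rw [hlen]; omega
      have hB : ¬ (m.getD (m.length / 2) 0 < 0) := by rw [hidx]; exact this
      simp [hA, hnil, -List.getD_eq_getElem?_getD, hB]
    · have : m.length / 2 < N := by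
        rw [hlen]; omega
      have hB : m.getD (m.length / 2) 0 < 0 := hidx.mpr this
      simp [hA, hnil, -List.getD_eq_getElem?_getD, hB]
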